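-- pv_equiv track=rewrite | github.com/baoooliang/LeetCode | SplitStringIntoTheMaxNumberofUniqueSubstrings.py | maxUniqueSplit
-- ===== SOURCE A (Python) =====
-- def maxUniqueSplit(s: str) -> int:
--     def dfs(s, set_):
--         result = 0
--         if s:
--             for i in range(1, len(s)+1):
--                 s1 = s[:i]
--                 if s1 not in set_:
--                     set_.add(s1)
--                     result = max(result, 1 + dfs(s[i:], set_))
--                     set_.remove(s1)
--         return result
--
--     return dfs(s, set())
-- ===== SOURCE B (Python) =====
-- def maxUniqueSplit(s: str) -> int:
--     depth = 0
--     frontier = [(s, ())]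
--     while True:
--         nxt = []
--         for rest, used in frontier:
--             for i in range(1, len(rest) + 1):
--                 piece = rest[:i]
--                 if piece not in used:
--                     nxt.append((rest[i:], used + (piece,)))
--         if not nxt:
--             return depth
--         frontier = nxt
--         depth += 1
-- ===== Notes on version B (the rewrite author's own statement) =====
-- stated objective: alternative
-- what changed: Replaces the recursive DFS with a backtracked uniqueness set by an iterative breadth-first level expansion: each level is the list of (remaining suffix, tuple of used pieces) states of all partial splits of that size, and the answer is the depth of the last non-empty level.
import Mathlib
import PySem

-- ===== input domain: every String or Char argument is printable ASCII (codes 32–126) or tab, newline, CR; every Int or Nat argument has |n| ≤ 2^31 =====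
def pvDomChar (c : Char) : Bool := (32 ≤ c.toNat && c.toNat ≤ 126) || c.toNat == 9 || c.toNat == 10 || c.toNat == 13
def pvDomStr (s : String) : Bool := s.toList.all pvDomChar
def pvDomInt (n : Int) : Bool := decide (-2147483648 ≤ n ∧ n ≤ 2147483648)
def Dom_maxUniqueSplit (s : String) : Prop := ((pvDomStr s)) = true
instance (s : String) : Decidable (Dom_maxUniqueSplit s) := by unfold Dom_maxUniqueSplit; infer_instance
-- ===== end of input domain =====

-- B replaces A's recursive DFS with a backtracked uniqueness set by an iterative
-- breadth-first level expansion over (remaining-suffix, used-pieces) states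
-- (alternative decomposition, same exponential cost).

-- ===== PORT A =====
-- termination helper for the recursive dfs (cited by decreasing_by)
theorem pvSliceFromLenLt (l : List Char) (i : Int) (h1 : 1 ≤ i) (hne : l ≠ []) :
    (PySem.List.slice l (some i) none).length < l.length := by
  rw [PySem.List.slice_from l (show (0:Int) ≤ i by omega)]
  have : 1 ≤ i.toNat := by omega
  have : l.length ≠ 0 := by simpa using List.length_pos_of_ne_nil hne |>.ne'
  simp [List.length_drop]
  omega

-- dfs(s, set_) of A, on the character list; the add-then-remove backtracking is the
-- functional call with set_.add s1 (s1 ∉ set_ in that branch, so remove restores set_).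
def pvDfs (l : List Char) (set_ : PySem.Set (List Char)) : Int :=
  if _h : l = [] then 0
  else
    (PySem.List.pyRange 1 ((l.length : Int) + 1) 1).attach.foldl
      (fun result i =>
        let s1 := PySem.List.slice l none (some i.1)
        if PySem.Set.contains set_ s1 then result
        else max result (1 + pvDfs (PySem.List.slice l (some i.1) none) (PySem.Set.add set_ s1)))
      0
termination_by l.length
decreasing_by
  exact pvSliceFromLenLt l i.1 ((PySem.List.mem_pyRange_one.mp i.2).1) _h

def maxUniqueSplit (s : String) : Int := pvDfs s.toList PySem.Set.empty

-- ===== PORT B =====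
-- one BFS level: all one-piece extensions of the states of the current frontier
def pvStep (F : List (List Char × List (List Char))) : List (List Char × List (List Char)) :=
  F.foldl (fun nxt st =>
    (PySem.List.pyRange 1 ((st.1.length : Int) + 1) 1).foldl (fun nxt i =>
      let piece := PySem.List.slice st.1 none (some i)
      if piece ∈ st.2 then nxt
      else nxt ++ [(PySem.List.slice st.1 (some i) none, st.2 ++ [piece])]) nxt) []

-- membership in one inner loop pass (helper for pvStep_mem, proved by induction)
theorem pvInnerMem (r : List Char) (u : List (List Char)) (L : List Int)
    (acc : List (List Char × List (List Char))) (st' : List Char × List (List Char)) :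
    st' ∈ L.foldl (fun nxt i =>
        let piece := PySem.List.slice r none (some i)
        if piece ∈ u then nxt
        else nxt ++ [(PySem.List.slice r (some i) none, u ++ [piece])]) acc
      ↔ st' ∈ acc ∨ ∃ i ∈ L, PySem.List.slice r none (some i) ∉ u ∧
          st' = (PySem.List.slice r (some i) none, u ++ [PySem.List.slice r none (some i)]) := by
  induction L generalizing acc with
  | nil => simp
  | cons a L ih =>
    simp only [List.foldl_cons]
    by_cases h : PySem.List.slice r none (some a) ∈ u
    · rw [if_pos h, ih]
      constructor
      · rintro (h1 | ⟨i, hi, h2, h3⟩)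
        · exact Or.inl h1
        · exact Or.inr ⟨i, List.mem_cons_of_mem _ hi, h2, h3⟩
      · rintro (h1 | ⟨i, hi, h2, h3⟩)
        · exact Or.inl h1
        · rcases List.mem_cons.mp hi with rfl | hi
          · exact absurd h h2
          · exact Or.inr ⟨i, hi, h2, h3⟩
    · rw [if_neg h, ih]
      constructor
      · rintro (h1 | ⟨i, hi, h2, h3⟩)
        · rcases List.mem_append.mp h1 with h1 | h1
          · exact Or.inl h1
          · exact Or.inr ⟨a, List.mem_cons_self .., h, by simpa using h1⟩
        · exact Or.inr ⟨i, List.mem_cons_of_mem _ hi, h2, h3⟩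
      · rintro (h1 | ⟨i, hi, h2, h3⟩)
        · exact Or.inl (List.mem_append.mpr (Or.inl h1))
        · rcases List.mem_cons.mp hi with rfl | hi
          · exact Or.inl (List.mem_append.mpr (Or.inr (by simp [h3])))
          · exact Or.inr ⟨i, hi, h2, h3⟩

-- full characterisation of a BFS step (used both for termination and for the invariant)
theorem pvStep_mem (F : List (List Char × List (List Char)))
    (st' : List Char × List (List Char)) :
    st' ∈ pvStep F ↔ ∃ st ∈ F, ∃ k : Nat, 1 ≤ k ∧ k ≤ st.1.length ∧
      st.1.take k ∉ st.2 ∧ st' = (st.1.drop k, st.2 ++ [st.1.take k]) := by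
  have outer : ∀ (G : List (List Char × List (List Char)))
      (acc : List (List Char × List (List Char))),
      st' ∈ G.foldl (fun nxt st =>
        (PySem.List.pyRange 1 ((st.1.length : Int) + 1) 1).foldl (fun nxt i =>
          let piece := PySem.List.slice st.1 none (some i)
          if piece ∈ st.2 then nxt
          else nxt ++ [(PySem.List.slice st.1 (some i) none, st.2 ++ [piece])]) nxt) acc
      ↔ st' ∈ acc ∨ ∃ st ∈ G, ∃ i ∈ PySem.List.pyRange 1 ((st.1.length : Int) + 1) 1,
          PySem.List.slice st.1 none (some i) ∉ st.2 ∧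
          st' = (PySem.List.slice st.1 (some i) none, st.2 ++ [PySem.List.slice st.1 none (some i)]) := by
    intro G
    induction G with
    | nil => simp
    | cons a G ih =>
      intro acc
      simp only [List.foldl_cons]
      rw [ih, pvInnerMem]
      constructor
      · rintro ((h1 | ⟨i, hi, h2, h3⟩) | ⟨st, hst, hrest⟩)
        · exact Or.inl h1
        · exact Or.inr ⟨a, List.mem_cons_self .., i, hi, h2, h3⟩
        · exact Or.inr ⟨st, List.mem_cons_of_mem _ hst, hrest⟩
      · rintro (h1 | ⟨st, hst, hrest⟩)
        · exact Or.inl (Or.inl h1)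
        · rcases List.mem_cons.mp hst with rfl | hst
          · exact Or.inl (Or.inr hrest)
          · exact Or.inr ⟨st, hst, hrest⟩
  rw [show pvStep F = F.foldl (fun nxt st =>
        (PySem.List.pyRange 1 ((st.1.length : Int) + 1) 1).foldl (fun nxt i =>
          let piece := PySem.List.slice st.1 none (some i)
          if piece ∈ st.2 then nxt
          else nxt ++ [(PySem.List.slice st.1 (some i) none, st.2 ++ [piece])]) nxt) [] from rfl,
      outer F []]
  simp only [List.not_mem_nil, false_or]
  constructor
  · rintro ⟨st, hst, i, hi, h2, h3⟩
    obtain ⟨hi1, hi2⟩ := PySem.List.mem_pyRange_one.mp hi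
    have h0 : (0 : Int) ≤ i := by omega
    rw [PySem.List.slice_to st.1 h0] at h2 h3
    rw [PySem.List.slice_from st.1 h0] at h3
    exact ⟨st, hst, i.toNat, by omega, by omega, h2, h3⟩
  · rintro ⟨st, hst, k, hk1, hk2, h2, h3⟩
    refine ⟨st, hst, (k : Int), PySem.List.mem_pyRange_one.mpr ⟨by omega, by omega⟩, ?_, ?_⟩
    · rw [PySem.List.slice_to st.1 (by omega : (0:Int) ≤ (k:Int))]
      simpa using h2
    · rw [PySem.List.slice_to st.1 (by omega : (0:Int) ≤ (k:Int)),
        PySem.List.slice_from st.1 (by omega : (0:Int) ≤ (k:Int))]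
      simpa using h3

-- the termination measure of the BFS loop: the longest remaining suffix in the frontier
def pvMaxRest (F : List (List Char × List (List Char))) : Nat :=
  (F.map (fun st => st.1.length)).foldr max 0

theorem pvLe_maxRest (F : List (List Char × List (List Char)))
    (st : List Char × List (List Char)) (h : st ∈ F) : st.1.length ≤ pvMaxRest F := by
  induction F with
  | nil => simp at h
  | cons a F ih =>
    simp only [pvMaxRest, List.map_cons, List.foldr_cons]
    rcases List.mem_cons.mp h with rfl | h
    · exact le_max_left _ _
    · exact le_trans (ih h) (le_max_right _ _)

theorem pvFoldrMaxLt (xs : List Nat) (b : Nat) (hb : 0 < b) (h : ∀ x ∈ xs, x < b) :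
    xs.foldr max 0 < b := by
  induction xs with
  | nil => simpa using hb
  | cons a xs ih => simp only [List.foldr_cons]; exact max_lt (h a (by simp)) (ih fun x hx => h x (by simp [hx]))

theorem pvStepLt (F : List (List Char × List (List Char))) (h : pvStep F ≠ []) :
    pvMaxRest (pvStep F) < pvMaxRest F := by
  obtain ⟨st', hst'⟩ := List.exists_mem_of_ne_nil _ h
  obtain ⟨st0, hst0, k0, hk01, hk02, _, _⟩ := (pvStep_mem F st').mp hst'
  have hpos : 0 < pvMaxRest F := lt_of_lt_of_le (by omega) (pvLe_maxRest F st0 hst0)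
  have hlt : ∀ x ∈ pvStep F, x.1.length < pvMaxRest F := by
    intro x hx
    obtain ⟨st, hst, k, hk1, hk2, _, hxeq⟩ := (pvStep_mem F x).mp hx
    have := pvLe_maxRest F st hst
    rw [hxeq]
    simp only [List.length_drop]
    omega
  unfold pvMaxRest
  apply pvFoldrMaxLt _ _ hpos
  intro x hx
  obtain ⟨y, hy, rfl⟩ := List.mem_map.mp hx
  exact hlt y hy

-- the while-True loop of B
def pvLoop (F : List (List Char × List (List Char))) (depth : Int) : Int :=
  if _h : pvStep F = [] then depth
  else pvLoop (pvStep F) (depth + 1)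
termination_by pvMaxRest F
decreasing_by exact pvStepLt F _h

def maxUniqueSplit_alt (s : String) : Int := pvLoop [(s.toList, [])] 0

-- ===== PRECONDITION & SPEC =====
def Spec_maxUniqueSplit (s : String) (out : Int) : Prop := out = maxUniqueSplit_alt s
instance (s : String) (out : Int) : Decidable (Spec_maxUniqueSplit s out) := by unfold Spec_maxUniqueSplit; infer_instance

-- ===== CLAIM (what is proved, stated in full; the proofs are below) =====
def Claim_equal_maxUniqueSplit : Prop := ∀ (s : String), Dom_maxUniqueSplit s → Spec_maxUniqueSplit s (maxUniqueSplit s)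

-- ===== LEMMAS AND PROOFS =====

-- a path state: a partial split of l into d pairwise-distinct nonempty pieces plus a remainder
def PvPath (l : List Char) (d : Nat) (st : List Char × List (List Char)) : Prop :=
  st.2.flatten ++ st.1 = l ∧ st.2.Nodup ∧ (∀ p ∈ st.2, p ≠ []) ∧ st.2.length = d

-- generic running-max fold facts
theorem pvFoldMax_ge_init {α : Type} (g : α → Int) (L : List α) (init : Int) :
    init ≤ L.foldl (fun a x => max a (g x)) init := by
  induction L generalizing init with
  | nil => simp
  | cons a L ih => exact le_trans (le_max_left _ _) (ih _)

theorem pvFoldMax_ge_mem {α : Type} (g : α → Int) (L : List α) (init : Int)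
    (x : α) (hx : x ∈ L) : g x ≤ L.foldl (fun a y => max a (g y)) init := by
  induction L generalizing init with
  | nil => simp at hx
  | cons a L ih =>
    rcases List.mem_cons.mp hx with rfl | hx
    · exact le_trans (le_max_right _ _) (pvFoldMax_ge_init _ _ _)
    · exact ih _ hx

theorem pvFoldMax_cases {α : Type} (g : α → Int) (L : List α) (init : Int) :
    L.foldl (fun a x => max a (g x)) init = init ∨
      ∃ x ∈ L, L.foldl (fun a x => max a (g x)) init = g x := by
  induction L generalizing init with
  | nil => exact Or.inl rfl
  | cons a L ih =>
    rcases ih (max init (g a)) with h | ⟨x, hx, h⟩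
    · simp only [List.foldl_cons]
      rcases max_cases init (g a) with ⟨h1, _⟩ | ⟨h1, _⟩
      · exact Or.inl (by rw [h, h1])
      · exact Or.inr ⟨a, by simp, by rw [h, h1]⟩
    · exact Or.inr ⟨x, by simp [hx], h⟩

-- reshaping the dfs fold: drop the attach, turn branches into a running max of pvG
def pvG (l : List Char) (S : PySem.Set (List Char)) (i : Int) : Int :=
  if PySem.Set.contains S (l.take i.toNat) then 0
  else 1 + pvDfs (l.drop i.toNat) (PySem.Set.add S (l.take i.toNat))

theorem pvFold_ite_shape {α : Type} (c : α → Prop) [DecidablePred c] (v : α → Int)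
    (L : List α) (init : Int) (h0 : 0 ≤ init) :
    L.foldl (fun a i => if c i then a else max a (v i)) init
      = L.foldl (fun a i => max a (if c i then 0 else v i)) init := by
  induction L generalizing init with
  | nil => rfl
  | cons a L ih =>
    simp only [List.foldl_cons]
    by_cases h : c a
    · rw [if_pos h, if_pos h, max_eq_left h0, ih init h0]
    · rw [if_neg h, if_neg h, ih _ (le_trans h0 (le_max_left _ _))]

theorem pvFoldlAttach {α β : Type} (l : List α) (F : β → {x // x ∈ l} → β) (f : β → α → β)
    (hf : ∀ acc x, F acc x = f acc x.1) (b : β) : l.attach.foldl F b = l.foldl f b := by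
  rw [show F = (fun acc (t : {x // x ∈ l}) => f acc t.1) from
    funext fun acc => funext fun t => hf acc t]
  exact List.foldl_attach

theorem pvDfs_eq (l : List Char) (S : PySem.Set (List Char)) (h : l ≠ []) :
    pvDfs l S = (PySem.List.pyRange 1 ((l.length : Int) + 1) 1).foldl
      (fun a i => max a (pvG l S i)) 0 := by
  rw [pvDfs, dif_neg h]
  rw [pvFoldlAttach _ _
    (fun result (i : Int) =>
      let s1 := PySem.List.slice l none (some i)
      if PySem.Set.contains S s1 then result
      else max result (1 + pvDfs (PySem.List.slice l (some i) none) (PySem.Set.add S s1)))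
    (fun _ _ => rfl) 0]
  rw [PySem.List.foldl_congr_mem' _ _
    (fun result i =>
      if PySem.Set.contains S (l.take i.toNat) then result
      else max result (1 + pvDfs (l.drop i.toNat) (PySem.Set.add S (l.take i.toNat)))) 0 ?_]
  · rw [pvFold_ite_shape
      (c := fun i : Int => PySem.Set.contains S (l.take i.toNat) = true)
      (v := fun i : Int => 1 + pvDfs (l.drop i.toNat) (PySem.Set.add S (l.take i.toNat))) _ 0 le_rfl]
    rfl
  · intro i hi acc
    obtain ⟨hi1, _⟩ := PySem.List.mem_pyRange_one.mp hi
    have h0 : (0 : Int) ≤ i := by omega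
    simp only [PySem.List.slice_to l h0, PySem.List.slice_from l h0]

theorem pvDfs_nonneg (l : List Char) (S : PySem.Set (List Char)) : 0 ≤ pvDfs l S := by
  by_cases h : l = []
  · rw [pvDfs]; simp [h]
  · rw [pvDfs_eq l S h]; exact pvFoldMax_ge_init _ _ _

-- every partial split avoiding S is counted by dfs
theorem pvDfs_ge_path (ps : List (List Char)) :
    ∀ (l r : List Char) (S : PySem.Set (List Char)),
      ps.flatten ++ r = l → ps.Nodup → (∀ p ∈ ps, p ≠ []) → (∀ p ∈ ps, p ∉ S) →
      (ps.length : Int) ≤ pvDfs l S := by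
  induction ps with
  | nil =>
    intro l r S _ _ _ _
    simpa using pvDfs_nonneg l S
  | cons p t ih =>
    intro l r S hflat hnd hne hns
    have hp : p ≠ [] := hne p (List.mem_cons_self ..)
    have hflat' : p ++ (t.flatten ++ r) = l := by simpa [List.append_assoc] using hflat
    have hl : l ≠ [] := by
      intro h; rw [h] at hflat'; exact hp (List.append_eq_nil_iff.mp hflat').1
    have hplen : 1 ≤ p.length := List.length_pos_of_ne_nil hp
    have hle : p.length ≤ l.length := by
      rw [← hflat']; simp
    have hmem : ((p.length : Int)) ∈ PySem.List.pyRange 1 ((l.length : Int) + 1) 1 :=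
      PySem.List.mem_pyRange_one.mpr ⟨by omega, by omega⟩
    have htake : l.take p.length = p := by rw [← hflat']; simp
    have hdrop : l.drop p.length = t.flatten ++ r := by rw [← hflat']; simp
    have hcont : ¬ (PySem.Set.contains S (l.take ((p.length : Int)).toNat) = true) := by
      rw [Int.toNat_natCast, htake, PySem.Set.contains_iff]
      exact hns p (List.mem_cons_self ..)
    have hG : pvG l S (p.length : Int) = 1 + pvDfs (t.flatten ++ r) (PySem.Set.add S p) := by
      rw [pvG, if_neg hcont, Int.toNat_natCast, htake, hdrop]
    have hIH : (t.length : Int) ≤ pvDfs (t.flatten ++ r) (PySem.Set.add S p) := by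
      refine ih (t.flatten ++ r) r (PySem.Set.add S p) rfl (List.nodup_cons.mp hnd).2
        (fun q hq => hne q (List.mem_cons_of_mem _ hq)) ?_
      intro q hq hqmem
      rcases (PySem.Set.mem_add S p q).mp hqmem with h | rfl
      · exact hns q (List.mem_cons_of_mem _ hq) h
      · exact (List.nodup_cons.mp hnd).1 hq
    have := pvFoldMax_ge_mem (pvG l S) (PySem.List.pyRange 1 ((l.length : Int) + 1) 1) 0
      (p.length : Int) hmem
    rw [← pvDfs_eq l S hl] at this
    rw [hG] at this
    simp only [List.length_cons]
    push_cast
    omega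

-- dfs is achieved by some partial split avoiding S
theorem pvDfs_achieve (n : Nat) :
    ∀ (l : List Char) (S : PySem.Set (List Char)), l.length ≤ n →
      ∃ (ps : List (List Char)) (r : List Char), ps.flatten ++ r = l ∧ ps.Nodup ∧ (∀ p ∈ ps, p ≠ []) ∧
        (∀ p ∈ ps, p ∉ S) ∧ (ps.length : Int) = pvDfs l S := by
  induction n with
  | zero =>
    intro l S hlen
    have hl : l = [] := List.eq_nil_of_length_eq_zero (by omega)
    subst hl
    exact ⟨[], [], by simp, by simp, by simp, by simp, by rw [pvDfs]; simp⟩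
  | succ n ih =>
    intro l S hlen
    by_cases hl : l = []
    · subst hl
      exact ⟨[], [], by simp, by simp, by simp, by simp, by rw [pvDfs]; simp⟩
    · rw [pvDfs_eq l S hl]
      rcases pvFoldMax_cases (pvG l S) (PySem.List.pyRange 1 ((l.length : Int) + 1) 1) 0 with
        h0 | ⟨i, hi, hEq⟩
      · exact ⟨[], l, by simp, by simp, by simp, by simp, by simp [h0]⟩
      · obtain ⟨hi1, hi2⟩ := PySem.List.mem_pyRange_one.mp hi
        by_cases hc : PySem.Set.contains S (l.take i.toNat) = true
        · refine ⟨[], l, by simp, by simp, by simp, by simp, ?_⟩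
          rw [hEq, pvG, if_pos hc]
          simp
        · have hG : pvG l S i = 1 + pvDfs (l.drop i.toNat) (PySem.Set.add S (l.take i.toNat)) := by
            rw [pvG, if_neg hc]
          have hlen' : (l.drop i.toNat).length ≤ n := by
            simp only [List.length_drop]
            have : 1 ≤ i.toNat := by omega
            omega
          obtain ⟨ps', r', hfl, hnd, hne, hnS, hlenEq⟩ := ih (l.drop i.toNat)
            (PySem.Set.add S (l.take i.toNat)) hlen'
          have htne : l.take i.toNat ≠ [] := by
            have h1 : 1 ≤ i.toNat := by omega
            have h2 : 0 < l.length := List.length_pos_of_ne_nil hl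
            intro h
            have := congrArg List.length h
            simp only [List.length_take, List.length_nil] at this
            omega
          refine ⟨l.take i.toNat :: ps', r', ?_, ?_, ?_, ?_, ?_⟩
          · simp only [List.flatten_cons, List.append_assoc, hfl]
            exact List.take_append_drop _ _
          · refine List.nodup_cons.mpr ⟨?_, hnd⟩
            intro hmem
            exact hnS _ hmem ((PySem.Set.mem_add _ _ _).mpr (Or.inr rfl))
          · intro p hp
            rcases List.mem_cons.mp hp with rfl | hp
            · exact htne
            · exact hne p hp
          · intro p hp
            rcases List.mem_cons.mp hp with rfl | hp
            · rw [← PySem.Set.contains_iff]; exact fun h => hc h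
            · intro hpS
              exact hnS p hp ((PySem.Set.mem_add _ _ _).mpr (Or.inl hpS))
          · rw [hEq, hG]
            simp only [List.length_cons]
            push_cast
            omega

-- the BFS step maps the set of d-states exactly onto the set of (d+1)-states
theorem pvStep_sound (l : List Char) (d : Nat) (F : List (List Char × List (List Char)))
    (hF : ∀ st ∈ F, PvPath l d st) :
    ∀ st' ∈ pvStep F, PvPath l (d + 1) st' := by
  intro st' hst'
  obtain ⟨st, hst, k, hk1, hk2, hknot, hsteq⟩ := (pvStep_mem F st').mp hst'
  obtain ⟨h1, h2, h3, h4⟩ := hF st hst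
  subst hsteq
  refine ⟨?_, ?_, ?_, ?_⟩
  · simp only [List.flatten_append, List.flatten_cons, List.flatten_nil, List.append_nil,
      List.append_assoc, List.take_append_drop]
    exact h1
  · rw [List.nodup_append]
    refine ⟨h2, by simp, ?_⟩
    intro a ha b hb heq
    rw [List.mem_singleton] at hb
    subst hb
    rw [heq] at ha
    exact hknot ha
  · intro p hp
    rcases List.mem_append.mp hp with hp | hp
    · exact h3 p hp
    · have : p = st.1.take k := by simpa using hp
      subst this
      intro hnil
      have := congrArg List.length hnil
      simp only [List.length_take, List.length_nil] at this
      omega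
  · simp [h4]

theorem pvStep_complete (l : List Char) (d : Nat) (F : List (List Char × List (List Char)))
    (hF : ∀ st, PvPath l d st → st ∈ F) :
    ∀ st', PvPath l (d + 1) st' → st' ∈ pvStep F := by
  rintro ⟨r, u⟩ ⟨h1, h2, h3, h4⟩
  have hune : u ≠ [] := by intro h; rw [h] at h4; simp at h4
  rcases List.eq_nil_or_concat u with h | ⟨u0, p, rfl⟩
  · exact absurd h hune
  simp only [List.concat_eq_append] at h1 h2 h3 h4 ⊢
  have hpne : p ≠ [] := h3 p (List.mem_append.mpr (Or.inr (List.mem_singleton.mpr rfl)))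
  have hpnotin : p ∉ u0 := by
    rw [List.nodup_append] at h2
    intro hmem
    exact h2.2.2 p hmem p (by simp) rfl
  have hst0 : PvPath l d (p ++ r, u0) := by
    refine ⟨?_, (List.nodup_append.mp h2).1, fun q hq => h3 q (List.mem_append.mpr (Or.inl hq)), ?_⟩
    · simpa [List.flatten_append, List.append_assoc] using h1
    · have := congrArg id h4
      simp only [List.length_append, List.length_cons, List.length_nil, id] at this ⊢
      omega
  refine (pvStep_mem F (r, u0 ++ [p])).mpr ⟨(p ++ r, u0), hF _ hst0, p.length, ?_, ?_, ?_, ?_⟩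
  · exact List.length_pos_of_ne_nil hpne
  · simp
  · simpa using hpnotin
  · simp

-- the BFS loop, started on the complete frontier of depth d, returns dfs l ∅
theorem pvLoop_correct (l : List Char) (m : Nat) :
    ∀ (F : List (List Char × List (List Char))) (d : Nat),
      (pvDfs l []).toNat ≤ d + m →
      (∀ st ∈ F, PvPath l d st) → (∀ st, PvPath l d st → st ∈ F) →
      (d : Int) ≤ pvDfs l [] →
      pvLoop F (d : Int) = pvDfs l [] := by
  induction m with
  | zero =>
    intro F d hfuel hF1 hF2 hdle
    have h0 : 0 ≤ pvDfs l [] := pvDfs_nonneg l []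
    have hdeq : (d : Int) = pvDfs l [] := by omega
    rw [pvLoop]
    rw [dif_pos ?_]
    · exact hdeq
    · by_contra hne
      obtain ⟨st', hst'⟩ := List.exists_mem_of_ne_nil _ hne
      have hpath := pvStep_sound l d F hF1 st' hst'
      obtain ⟨p1, p2, p3, p4⟩ := hpath
      have := pvDfs_ge_path st'.2 l st'.1 [] p1 p2 p3 (by simp)
      rw [p4] at this
      push_cast at this
      omega
  | succ m ih =>
    intro F d hfuel hF1 hF2 hdle
    by_cases hdeq : (d : Int) = pvDfs l []
    · rw [pvLoop]
      rw [dif_pos ?_]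
      · exact hdeq
      · by_contra hne
        obtain ⟨st', hst'⟩ := List.exists_mem_of_ne_nil _ hne
        obtain ⟨p1, p2, p3, p4⟩ := pvStep_sound l d F hF1 st' hst'
        have := pvDfs_ge_path st'.2 l st'.1 [] p1 p2 p3 (by simp)
        rw [p4] at this
        push_cast at this
        omega
    · have hdlt : (d : Int) < pvDfs l [] := lt_of_le_of_ne hdle hdeq
      obtain ⟨ps, r, hfl, hnd, hne, _, hlenEq⟩ := pvDfs_achieve l.length l [] le_rfl
      have hd1 : d + 1 ≤ ps.length := by
        have := hlenEq
        omega
      have hpath1 : PvPath l (d + 1) ((ps.drop (d + 1)).flatten ++ r, ps.take (d + 1)) := by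
        refine ⟨?_, List.Nodup.sublist (List.take_sublist _ _) hnd,
          fun q hq => hne q (List.mem_of_mem_take hq), ?_⟩
        · rw [← List.append_assoc, ← List.flatten_append, List.take_append_drop]
          exact hfl
        · simp only [List.length_take]
          omega
      have hmem := pvStep_complete l d F hF2 _ hpath1
      have hstep_ne : pvStep F ≠ [] := List.ne_nil_of_mem hmem
      rw [pvLoop, dif_neg hstep_ne]
      have hcast : (d : Int) + 1 = ((d + 1 : Nat) : Int) := by push_cast; ring
      rw [hcast]
      exact ih (pvStep F) (d + 1) (by omega)
        (pvStep_sound l d F hF1) (pvStep_complete l d F hF2) (by push_cast; omega)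

-- ===== VERDICT (by name: the statement is the Claim_ definition above) =====
theorem maxUniqueSplit_spec : Claim_equal_maxUniqueSplit := by
  intro s _
  unfold Spec_maxUniqueSplit maxUniqueSplit maxUniqueSplit_alt
  have h := pvLoop_correct s.toList (pvDfs s.toList []).toNat [(s.toList, [])] 0
    (by omega)
    (by rintro st hst; simp at hst; subst hst; exact ⟨rfl, by simp, by simp, rfl⟩)
    (by rintro ⟨r, u⟩ ⟨h1, _, _, h4⟩
        have : u = [] := List.eq_nil_of_length_eq_zero h4
        subst this; simp at h1 ⊢; exact h1)
    (pvDfs_nonneg _ _)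
  simpa [PySem.Set.empty] using h.symm
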